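-- pv_equiv track=rewrite | github.com/deepset-ai/haystack | haystack/components/preprocessors/document_cleaner.py | _ngram
-- ===== SOURCE A (Python) =====
-- from typing import Generator, List, Literal, Optional, Set
--
-- def _ngram(seq: str, n: int) -> Generator[str, None, None]:
--     """
--     Return all ngrams of length n from a text sequence. Each ngram consists of n words split by whitespace.
--
--     :param seq: The sequence to generate ngrams from.
--     :param n: The length of the ngrams to generate.
--     :returns: A Generator generating all ngrams of length n from the given sequence.
--     """
--
--     # In order to maintain the original whitespace, but still consider \n and \t for n-gram tokenization,
--     # we add a space here and remove it after creation of the ngrams again (see below)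
--     seq = seq.replace("\n", " \n")
--     seq = seq.replace("\t", " \t")
--
--     words = seq.split(" ")
--     ngrams = (
--         " ".join(words[i : i + n]).replace(" \n", "\n").replace(" \t", "\t") for i in range(0, len(words) - n + 1)
--     )
--
--     return ngrams
-- ===== SOURCE B (Python) =====
-- def _ngram(seq, n):
--     """
--     Return all ngrams of length n from a text sequence. Each ngram consists of n words split by whitespace.
--     """
--     seq = seq.replace("\n", " \n")
--     seq = seq.replace("\t", " \t")
--     words = seq.split(" ")
--     if n < 1 or n > len(words):
--         return (t for t in ())
--     return (
--         " ".join(t).replace(" \n", "\n").replace(" \t", "\t")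
--         for t in zip(*(words[i:] for i in range(n)))
--     )
-- ===== Notes on version B (the rewrite author's own statement) =====
-- stated objective: idiomatic
-- what changed: B replaces A's index loop over range(len(words)-n+1) with per-index two-sided slicing by the zip sliding-window idiom: after a no-ngrams-possible guard it zips n offset views words[i:] of the word list and joins each resulting tuple.
-- outside the precondition, e.g. on _ngram('a b', 0): A returns ['', '', ''], B returns []; on _ngram('ab', -1): A returns ['', '', ''], B returns []
import Mathlib
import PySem

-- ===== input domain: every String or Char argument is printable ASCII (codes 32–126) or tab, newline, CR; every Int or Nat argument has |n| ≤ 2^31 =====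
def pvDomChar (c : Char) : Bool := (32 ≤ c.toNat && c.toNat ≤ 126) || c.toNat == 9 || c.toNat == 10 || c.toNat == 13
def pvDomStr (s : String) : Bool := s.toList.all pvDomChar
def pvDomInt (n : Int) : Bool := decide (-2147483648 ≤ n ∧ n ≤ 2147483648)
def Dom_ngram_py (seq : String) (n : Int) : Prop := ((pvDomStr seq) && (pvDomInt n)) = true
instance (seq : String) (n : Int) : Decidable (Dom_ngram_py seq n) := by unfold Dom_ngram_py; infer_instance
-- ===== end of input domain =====

-- B generates the ngrams with the zip sliding-window idiom (n offset views of the word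
-- list zipped in parallel, after a natural no-ngrams-possible guard) instead of A's
-- index loop with two-sided slices.

-- ===== PORT A =====
-- the per-ngram postprocessing " ".join(...).replace(" \n", "\n").replace(" \t", "\t")
def ngramFix (t : List String) : String :=
  PySem.Str.replace (PySem.Str.replace (PySem.Str.join " " t) " \n" "\n") " \t" "\t"

def ngram_py (seq : String) (n : Int) : List String :=
  let seq1 := PySem.Str.replace seq "\n" " \n"
  let seq2 := PySem.Str.replace seq1 "\t" " \t"
  let words := (PySem.Str.split? seq2 " ").getD []   -- sep = " " ≠ "" so split? is some
  (PySem.List.pyRange 0 ((words.length : Int) - n + 1) 1).map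
    (fun i => ngramFix (PySem.List.slice words (some i) (some (i + n))))

-- ===== PORT B =====
-- port of Python's variadic zip(*views): zip of a list of lists, truncating at the shortest
def pyZip {α : Type} (ls : List (List α)) : List (List α) :=
  match ls with
  | [] => []
  | l :: rest =>
      rest.foldl (fun acc l' => List.zipWith (fun t x => t ++ [x]) acc l')
        (l.map (fun x => [x]))

def ngram_py_alt (seq : String) (n : Int) : List String :=
  let seq1 := PySem.Str.replace seq "\n" " \n"
  let seq2 := PySem.Str.replace seq1 "\t" " \t"
  let words := (PySem.Str.split? seq2 " ").getD []
  if n < 1 ∨ (words.length : Int) < n then [] else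
    let views := (PySem.List.pyRange 0 n 1).map (fun i => PySem.List.slice words (some i) none)
    (pyZip views).map ngramFix

-- ===== PRECONDITION & SPEC =====
-- Pre_ excludes n ≤ 0, an unspecified corner (a nonpositive ngram length) where A's value —
-- len(words)+|n|+1 copies of the empty string, an artefact of range(0, len(words)-n+1)
-- combined with empty slices words[i:i+n] — and B's value — no ngrams — are both defensible.
def Pre_ngram_py (seq : String) (n : Int) : Prop := 1 ≤ n
instance (seq : String) (n : Int) : Decidable (Pre_ngram_py seq n) := by unfold Pre_ngram_py; infer_instance

def pvWitness_ngram_py : String × Int := ("a b", 2)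

def Spec_ngram_py (seq : String) (n : Int) (out : List String) : Prop := out = ngram_py_alt seq n
instance (seq : String) (n : Int) (out : List String) : Decidable (Spec_ngram_py seq n out) := by unfold Spec_ngram_py; infer_instance

-- ===== CLAIM (what is proved, stated in full; the proofs are below) =====
def Claim_equal_ngram_py : Prop := ∀ (seq : String) (n : Int), Dom_ngram_py seq n → Pre_ngram_py seq n → Spec_ngram_py seq n (ngram_py seq n)

-- ===== LEMMAS AND PROOFS =====

lemma pyZip_singleton {α : Type} (l : List α) :
    pyZip [l] = l.map (fun x => [x]) := rfl

lemma pyZip_append_singleton {α : Type} (l : List α) (rest : List (List α)) (y : List α) :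
    pyZip ((l :: rest) ++ [y]) =
      List.zipWith (fun t x => t ++ [x]) (pyZip (l :: rest)) y := by
  simp [pyZip, List.foldl_append]

lemma take_one_drop {α : Type} (ws : List α) (i : Nat) (h : i < ws.length) :
    (ws.drop i).take 1 = [ws[i]] := by
  rw [List.drop_eq_getElem_cons h]
  rfl

-- key lemma: zipping the n shifted views yields exactly the sliding windows
lemma pyZip_shifts {α : Type} (ws : List α) (m : Nat) (hm : 1 ≤ m) :
    pyZip ((List.range m).map (fun i => ws.drop i)) =
      (List.range (ws.length + 1 - m)).map (fun i => (ws.drop i).take m) := by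
  induction m with
  | zero => omega
  | succ m ih =>
    rcases Nat.eq_or_lt_of_le hm with h1 | h1
    · -- m + 1 = 1
      have hz : m = 0 := by omega
      subst hz
      have h2 : (List.range (0 + 1)).map (fun i => ws.drop i) = [ws] := by simp
      rw [h2, pyZip_singleton, Nat.add_sub_cancel]
      apply List.ext_getElem (by simp)
      intro i hi1 hi2
      simp only [List.getElem_map, List.getElem_range]
      rw [take_one_drop ws i (by simpa using hi2)]
    · -- 1 ≤ m
      have hm1 : 1 ≤ m := by omega
      have hcons : ∃ l rest, (List.range m).map (fun i => ws.drop i) = l :: rest := by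
        cases h : (List.range m).map (fun i => ws.drop i) with
        | nil => exfalso; have := congrArg List.length h; simp at this; omega
        | cons l rest => exact ⟨l, rest, rfl⟩
      obtain ⟨l, rest, hlr⟩ := hcons
      rw [List.range_succ, List.map_append, hlr, List.map_singleton,
        pyZip_append_singleton, ← hlr, ih hm1]
      apply List.ext_getElem
      · simp only [List.length_zipWith, List.length_map, List.length_range,
          List.length_drop]
        omega
      · intro i hi1 hi2
        have hiL : i < ws.length - m := by
          simp only [List.length_zipWith, List.length_map, List.length_range,
            List.length_drop] at hi1
          omega
        simp only [List.getElem_zipWith, List.getElem_map, List.getElem_range]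
        have hgd : (ws.drop m)[i]'(by simp; omega) = ws[m + i]'(by omega) := by
          simp
        rw [hgd]
        have hmlt : m < (ws.drop i).length := by simp; omega
        have hsw : (ws.drop i)[m]'hmlt = ws[m + i]'(by omega) := by
          rw [List.getElem_drop]
          congr 1
          omega
        rw [List.take_add_one, List.getElem?_eq_getElem hmlt, hsw]
        simp

lemma ngram_eq_of_pos (seq : String) (n : Int) (hn : 1 ≤ n) :
    ngram_py seq n = ngram_py_alt seq n := by
  unfold ngram_py ngram_py_alt
  dsimp only
  set words := (PySem.Str.split? (PySem.Str.replace (PySem.Str.replace seq "\n" " \n") "\t" " \t") " ").getD [] with hw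
  obtain ⟨m, hm, rfl⟩ : ∃ m : Nat, 1 ≤ m ∧ n = (m : Int) :=
    ⟨n.toNat, by omega, by omega⟩
  by_cases hbig : (words.length : Int) < (m : Int)
  · -- not enough words: both sides are empty
    rw [if_pos (Or.inr hbig), PySem.List.pyRange_one_eq_nil (by omega), List.map_nil]
  rw [if_neg (by omega)]
  -- B side: views are the shifted suffixes
  have hviews : (PySem.List.pyRange 0 (m : Int) 1).map
        (fun i => PySem.List.slice words (some i) none) =
      (List.range m).map (fun i => words.drop i) := by
    rw [PySem.List.pyRange_one]
    simp only [Int.sub_zero, Int.toNat_natCast, List.map_map]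
    apply List.map_congr_left
    intro k hk
    simp only [Function.comp_apply, Int.zero_add]
    exact PySem.List.slice_from_natCast words k
  rw [hviews, pyZip_shifts words m hm]
  -- A side: range of window starts
  rw [PySem.List.pyRange_one]
  have hK : ((words.length : Int) - (m : Int) + 1 - 0).toNat = words.length + 1 - m := by
    omega
  rw [hK]
  simp only [List.map_map]
  apply List.map_congr_left
  intro k hk
  simp only [Function.comp_apply, Int.zero_add]
  rw [PySem.List.slice_natCast_add]

-- ===== VERDICT (by name: the statement is the Claim_ definition above) =====
theorem ngram_py_spec : Claim_equal_ngram_py := by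
  intro seq n _ hpre
  exact ngram_eq_of_pos seq n (by unfold Pre_ngram_py at hpre; omega)
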